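-- pv_equiv track=rewrite | github.com/njankowski/dftools | util/compression.py | get_non_contiguous_count
-- ===== SOURCE A (Python) =====
-- def get_contiguous_count(list, start, end, value):
--     """
--     Gets the number of times that a value repeats in a given interval.
--
--     :param list: The list to analyze.
--     :param start: The index to start from. (inclusive)
--     :param end: The index to stop at. (exclusive)
--     :param value: The value to check for contiguousness.
--     :return:
--     """
--     total = 0
--     for index in range(start, end):
--         if list[index] == value:
--             total += 1
--         else:
--             break
--     return total
--
-- def get_non_contiguous_count(list, start, end, contiguous_limit, contiguous_values=[]):
--     """
--     Gets the number of non-repeating values before a contiguous section in a given interval.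
--
--     :param list: The list to analyze.
--     :param start: The index to start from. (inclusive)
--     :param end: The index to stop at. (exclusive)
--     :param contiguous_limit: How many times a value must appear before being considered a contiguous section.
--     :param contiguous_values: Values to look for contiguousness of. If empty, all values are analyzed.
--     e.g. If looking for contiguous zeroes only, make contiguous_values = [0]. When a contiguous string of zeroes
--     are found matching the contiguous_limit, the search terminates.
--     :return: Number of non-contiguous values before a contiguous section.
--     """
--     total = 0
--     index = start
--     while index < end:
--         if contiguous_values:
--             if list[index] in contiguous_values:
--                 contiguous = get_contiguous_count(list, index, end, list[index])
--             else:
--                 contiguous = 1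
--         else:
--             contiguous = get_contiguous_count(list, index, end, list[index])
--
--         if contiguous < contiguous_limit:
--             total += contiguous
--         else:
--             break
--         index += contiguous
--     return total
-- ===== SOURCE B (Python) =====
-- def get_non_contiguous_count(list, start, end, contiguous_limit, contiguous_values=[]):
--     # B: A's running total always equals how far it has advanced, so the answer is
--     # the position of the first "stop" trigger in the slice.  Stage 1: backward DP
--     # rl[i] = length of the run of equal values starting at i.  Stage 2: return the
--     # first index i that triggers a stop (non-target value with limit <= 1, or a
--     # run of length >= limit), defaulting to the slice length.
--     s = list[start:end]
--     n = len(s)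
--     rl = [1] * n
--     for i in range(n - 2, -1, -1):
--         if s[i] == s[i + 1]:
--             rl[i] = rl[i + 1] + 1
--     for i in range(n):
--         if contiguous_values and s[i] not in contiguous_values:
--             if contiguous_limit <= 1:
--                 return i
--         elif rl[i] >= contiguous_limit:
--             return i
--     return n
-- ===== Notes on version B (the rewrite author's own statement) =====
-- stated objective: alternative
-- what changed: Instead of A's accumulating index-advance while-loop with helper re-scans, B exploits that A's running total always equals the distance advanced: it precomputes a backward run-length DP array over the slice and returns the index of the first stop-triggering position (or the slice length), accumulating nothing.
-- outside the precondition, e.g. on get_non_contiguous_count([1, 2, 3], -2, 3, 2, []): A returns 5, B returns 2; on get_non_contiguous_count([1, 2], 0, -1, 5, []): A returns 0, B returns 1; on get_non_contiguous_count([1, 2, 3], 1, 5, 2, []): A raises IndexError, B returns 2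
import Mathlib
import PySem

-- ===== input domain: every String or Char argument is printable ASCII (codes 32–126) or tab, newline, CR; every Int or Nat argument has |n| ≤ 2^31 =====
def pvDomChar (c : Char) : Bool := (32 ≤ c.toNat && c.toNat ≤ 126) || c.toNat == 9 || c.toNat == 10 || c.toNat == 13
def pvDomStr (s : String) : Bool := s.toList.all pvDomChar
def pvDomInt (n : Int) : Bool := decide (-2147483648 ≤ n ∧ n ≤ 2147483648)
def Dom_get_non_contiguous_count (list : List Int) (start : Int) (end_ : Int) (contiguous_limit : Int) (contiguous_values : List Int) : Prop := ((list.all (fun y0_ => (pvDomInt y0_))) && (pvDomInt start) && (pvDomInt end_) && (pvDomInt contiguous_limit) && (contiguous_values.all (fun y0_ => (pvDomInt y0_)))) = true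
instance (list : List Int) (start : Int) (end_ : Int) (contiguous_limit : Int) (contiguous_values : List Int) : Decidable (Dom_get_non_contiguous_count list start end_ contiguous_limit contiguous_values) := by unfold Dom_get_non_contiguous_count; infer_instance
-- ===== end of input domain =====

-- B replaces A's accumulating while-loop + helper re-scans by a backward run-length DP over
-- the slice followed by a search for the first stop-triggering position (objective: alternative).

-- ===== PORT A =====
-- helper get_contiguous_count: 'for index in range(start, end): if list[index] == value: total += 1 else: break'
def pvGccGo (l : List Int) (value : Int) : List Int → Int → Int
  | [], total => total
  | i :: rest, total =>
    match PySem.List.pyGet? l i with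
    | none => total   -- IndexError in Python; such inputs are outside Pre_
    | some v => if v = value then pvGccGo l value rest (total + 1) else total

def get_contiguous_count (l : List Int) (start : Int) (end_ : Int) (value : Int) : Int :=
  pvGccGo l value (PySem.List.pyRange start end_) 0

-- the while-loop of A; fuel bounds the iteration count (each iteration advances index by
-- contiguous ≥ 1 on inputs where Python does not raise, so (end - start).toNat suffices)
def pvGncLoop (l : List Int) (end_ limit : Int) (cv : List Int) : Nat → Int → Int → Int
  | 0, _, total => total
  | fuel+1, index, total =>
    if index < end_ then
      let contiguous : Int :=
        if cv ≠ [] then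
          match PySem.List.pyGet? l index with
          | none => 0   -- IndexError in Python; outside Pre_
          | some v => if v ∈ cv then get_contiguous_count l index end_ v else 1
        else
          match PySem.List.pyGet? l index with
          | none => 0   -- IndexError in Python; outside Pre_
          | some v => get_contiguous_count l index end_ v
      if contiguous < limit then
        pvGncLoop l end_ limit cv fuel (index + contiguous) (total + contiguous)
      else total
    else total

def get_non_contiguous_count (list : List Int) (start : Int) (end_ : Int) (contiguous_limit : Int) (contiguous_values : List Int) : Int :=
  pvGncLoop list end_ contiguous_limit contiguous_values (end_ - start).toNat start 0

-- ===== PORT B =====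
-- stage 1: the backward DP 'for i in range(n-2, -1, -1): if s[i]==s[i+1]: rl[i]=rl[i+1]+1'
-- written as the right-to-left recursion it performs
def pvRl : List Int → List Int
  | [] => []
  | [_] => [1]
  | x :: y :: xs =>
    let r := pvRl (y :: xs)
    (if x = y then r.headD 1 + 1 else 1) :: r

-- stage 2: 'for i in range(n): … return i' over the (value, run-length) positions
def pvFindStop (limit : Int) (cv : List Int) : List (Int × Int) → Int → Int
  | [], i => i
  | (x, r) :: rest, i =>
    if cv ≠ [] ∧ x ∉ cv then
      if limit ≤ 1 then i else pvFindStop limit cv rest (i + 1)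
    else if limit ≤ r then i else pvFindStop limit cv rest (i + 1)

def get_non_contiguous_count_alt (list : List Int) (start : Int) (end_ : Int) (contiguous_limit : Int) (contiguous_values : List Int) : Int :=
  let s := PySem.List.slice list (some start) (some end_)
  pvFindStop contiguous_limit contiguous_values (s.zip (pvRl s)) 0

-- ===== PRECONDITION & SPEC =====
-- Pre_ excludes (a) running intervals (start < end_) that reach a negative or past-the-end
-- index, where A raises IndexError or returns a value via Python's accidental negative-index
-- wraparound, and (b) degenerate intervals (start ≥ end_) whose slice list[start:end] is
-- nonetheless nonempty (negative bounds), where A's 0 from comparing raw signed bounds and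
-- B's scan of the slice are both defensible readings of an unspecified corner.
def Pre_get_non_contiguous_count (list : List Int) (start : Int) (end_ : Int) (contiguous_limit : Int) (contiguous_values : List Int) : Prop :=
  (start < end_ → 0 ≤ start ∧ end_ ≤ (list.length : Int)) ∧
  (start < end_ ∨ PySem.List.clampIdx list.length end_ ≤ PySem.List.clampIdx list.length start)

instance (list : List Int) (start : Int) (end_ : Int) (contiguous_limit : Int) (contiguous_values : List Int) : Decidable (Pre_get_non_contiguous_count list start end_ contiguous_limit contiguous_values) := by
  unfold Pre_get_non_contiguous_count; infer_instance

def pvWitness_get_non_contiguous_count : List Int × Int × Int × Int × List Int :=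
  ([1, 1, 2, 0, 1], 0, 5, 3, [1])

def Spec_get_non_contiguous_count (list : List Int) (start : Int) (end_ : Int) (contiguous_limit : Int) (contiguous_values : List Int) (out : Int) : Prop := out = get_non_contiguous_count_alt list start end_ contiguous_limit contiguous_values
instance (list : List Int) (start : Int) (end_ : Int) (contiguous_limit : Int) (contiguous_values : List Int) (out : Int) : Decidable (Spec_get_non_contiguous_count list start end_ contiguous_limit contiguous_values out) := by unfold Spec_get_non_contiguous_count; infer_instance

-- ===== CLAIM (what is proved, stated in full; the proofs are below) =====
def Claim_equal_get_non_contiguous_count : Prop := ∀ (list : List Int) (start : Int) (end_ : Int) (contiguous_limit : Int) (contiguous_values : List Int), Dom_get_non_contiguous_count list start end_ contiguous_limit contiguous_values → Pre_get_non_contiguous_count list start end_ contiguous_limit contiguous_values → Spec_get_non_contiguous_count list start end_ contiguous_limit contiguous_values (get_non_contiguous_count list start end_ contiguous_limit contiguous_values)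

-- ===== LEMMAS AND PROOFS =====

-- the segment of the list the loop still has to visit
def pvSeg (l : List Int) (end_ index : Int) : List Int :=
  (l.take end_.toNat).drop index.toNat

theorem pvSeg_cons (l : List Int) (end_ index : Int)
    (h0 : 0 ≤ index) (h1 : index < end_) (h2 : end_ ≤ (l.length : Int)) :
    pvSeg l end_ index = l[index.toNat]'(by omega) :: pvSeg l end_ (index + 1) := by
  unfold pvSeg
  have hlt : index.toNat < (l.take end_.toNat).length := by
    simp [List.length_take]; omega
  rw [List.drop_eq_getElem_cons hlt]
  congr 1
  · exact List.getElem_take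
  · congr 1; omega

theorem takeWhile_len_le (p : Int → Bool) (l : List Int) : (l.takeWhile p).length ≤ l.length := by
  have h := congrArg List.length (List.takeWhile_append_dropWhile (p := p) (l := l))
  simp only [List.length_append] at h
  omega

theorem dropWhile_eq_drop (p : Int → Bool) (l : List Int) :
    l.dropWhile p = l.drop (l.takeWhile p).length := by
  induction l with
  | nil => simp
  | cons x xs ih => by_cases h : p x <;> simp [List.takeWhile, List.dropWhile, h, ih]

theorem pvSeg_len (l : List Int) (end_ index : Int)
    (h0 : 0 ≤ index) (h1 : index ≤ end_) (h2 : end_ ≤ (l.length : Int)) :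
    (pvSeg l end_ index).length = (end_ - index).toNat := by
  unfold pvSeg; simp [List.length_take]; omega

-- get_contiguous_count counts the matching prefix of the remaining segment
theorem gcc_go_spec (l : List Int) (value : Int) (end_ : Int) (hle : end_ ≤ (l.length : Int)) :
    ∀ (n : Nat) (index total : Int), (end_ - index).toNat = n → 0 ≤ index →
    pvGccGo l value (PySem.List.pyRange index end_) total
      = total + (((pvSeg l end_ index).takeWhile (fun y => y == value)).length : Int) := by
  intro n
  induction n with
  | zero =>
    intro index total hn h0
    have hge : ¬ index < end_ := by omega
    have hseg : pvSeg l end_ index = [] := by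
      apply List.eq_nil_of_length_eq_zero
      unfold pvSeg; simp [List.length_take]; omega
    rw [PySem.List.pyRange_one_eq_nil (by omega), hseg]
    simp [pvGccGo]
  | succ n ih =>
    intro index total hn h0
    have hlt : index < end_ := by omega
    have hidx : index < (l.length : Int) := by omega
    rw [PySem.List.pyRange_one_cons hlt]
    rw [pvSeg_cons l end_ index h0 hlt hle]
    simp only [pvGccGo, PySem.List.pyGet?_eq_some_getElem l h0 hidx]
    by_cases hv : l[index.toNat]'(by omega) = value
    · rw [if_pos hv, ih (index + 1) (total + 1) (by omega) (by omega)]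
      simp [List.takeWhile, hv]
      ring
    · rw [if_neg hv]
      have : (l[index.toNat]'(by omega) == value) = false := by simpa using hv
      simp [List.takeWhile, this]

theorem gcc_spec (l : List Int) (index end_ : Int)
    (h0 : 0 ≤ index) (h1 : index < end_) (h2 : end_ ≤ (l.length : Int)) :
    get_contiguous_count l index end_ (l[index.toNat]'(by omega))
      = (((pvSeg l end_ index).takeWhile (fun y => y == l[index.toNat]'(by omega))).length : Int) := by
  unfold get_contiguous_count
  rw [gcc_go_spec l _ end_ h2 (end_ - index).toNat index 0 rfl h0]
  ring

-- B-side: the DP list starts with the leading run length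
theorem pvRl_cons (x : Int) (xs : List Int) :
    pvRl (x :: xs) = (1 + ((xs.takeWhile (fun y => y == x)).length : Int)) :: pvRl xs := by
  induction xs generalizing x with
  | nil => simp [pvRl]
  | cons y ys ih =>
    by_cases hxy : x = y
    · subst hxy
      rw [pvRl, ih x]
      simp [List.takeWhile]
      push_cast
      ring
    · have hby : (y == x) = false := by simpa using fun h => hxy h.symm
      rw [pvRl]
      simp [List.takeWhile, hby, hxy]

-- the index accumulator of pvFindStop shifts out
theorem findStop_shift (limit : Int) (cv : List Int) :
    ∀ (ps : List (Int × Int)) (i : Int),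
    pvFindStop limit cv ps i = i + pvFindStop limit cv ps 0 := by
  intro ps
  induction ps with
  | nil => intro i; simp [pvFindStop]
  | cons p rest ih =>
    intro i
    obtain ⟨x, r⟩ := p
    simp only [pvFindStop]
    split_ifs with h1 h2 h3
    · ring
    · rw [ih (i + 1), ih (0 + 1)]; ring
    · ring
    · rw [ih (i + 1), ih (0 + 1)]; ring

-- skipping a whole short run on the B side
theorem findStop_run_skip (limit : Int) (cv : List Int) (x : Int)
    (hb : ¬ (cv ≠ [] ∧ x ∉ cv)) :
    ∀ (xs : List Int), 1 + ((xs.takeWhile (fun y => y == x)).length : Int) < limit →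
    pvFindStop limit cv ((x :: xs).zip (pvRl (x :: xs))) 0
      = (1 + ((xs.takeWhile (fun y => y == x)).length : Int))
        + pvFindStop limit cv
            ((xs.dropWhile (fun y => y == x)).zip (pvRl (xs.dropWhile (fun y => y == x)))) 0 := by
  intro xs
  induction xs generalizing x with
  | nil =>
    intro hlt
    simp only [List.takeWhile_nil, List.dropWhile_nil, List.length_nil, Int.natCast_zero,
      add_zero] at hlt ⊢
    simp only [pvRl, List.zip_cons_cons, List.zip_nil_left]
    simp only [pvFindStop, if_neg hb, if_neg (by omega : ¬ limit ≤ (1 : Int))]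
    simp
  | cons y ys ih =>
    intro hlt
    rw [pvRl_cons x (y :: ys), List.zip_cons_cons]
    have hnle : ¬ limit ≤ 1 + (((y :: ys).takeWhile (fun z => z == x)).length : Int) := by omega
    simp only [pvFindStop, if_neg hb, if_neg hnle]
    rw [findStop_shift limit cv _ (0 + 1)]
    by_cases hxy : y = x
    · subst hxy
      have htw : ((y :: ys).takeWhile (fun z => z == y)) = y :: ys.takeWhile (fun z => z == y) := by
        simp [List.takeWhile]
      have hdw : ((y :: ys).dropWhile (fun z => z == y)) = ys.dropWhile (fun z => z == y) := by
        simp [List.dropWhile]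
      rw [htw] at hlt ⊢
      rw [hdw]
      have hlt' : 1 + ((ys.takeWhile (fun z => z == y)).length : Int) < limit := by
        simp only [List.length_cons] at hlt; push_cast at hlt ⊢; omega
      rw [ih y hb hlt']
      simp only [List.length_cons]
      push_cast
      ring
    · have hby : (y == x) = false := by simpa using hxy
      have htw : ((y :: ys).takeWhile (fun z => z == x)) = [] := by
        simp [List.takeWhile, hby]
      have hdw : ((y :: ys).dropWhile (fun z => z == x)) = y :: ys := by
        simp [List.dropWhile, hby]
      rw [htw, hdw]
      simp only [List.length_nil, Int.natCast_zero, add_zero]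
      ring

-- main loop invariant: A's accumulating loop = index of B's first stop trigger
theorem main_loop (l : List Int) (end_ limit : Int) (cv : List Int) :
    ∀ (fuel : Nat) (index total : Int), 0 ≤ index → index ≤ end_ → end_ ≤ (l.length : Int) →
    (pvSeg l end_ index).length ≤ fuel →
    pvGncLoop l end_ limit cv fuel index total
      = total + pvFindStop limit cv
          ((pvSeg l end_ index).zip (pvRl (pvSeg l end_ index))) 0 := by
  intro fuel
  induction fuel with
  | zero =>
    intro index total h0 h1 h2 hf
    have hseg : pvSeg l end_ index = [] := List.eq_nil_of_length_eq_zero (by omega)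
    simp [pvGncLoop, hseg, pvFindStop]
  | succ fuel ih =>
    intro index total h0 h1 h2 hf
    by_cases hlt : index < end_
    · have hidx : index < (l.length : Int) := by omega
      have hcons := pvSeg_cons l end_ index h0 hlt h2
      set x := l[index.toNat]'(by omega) with hxdef
      set xs := pvSeg l end_ (index + 1) with hxs
      set tw : Nat := (xs.takeWhile (fun y => y == x)).length with htw
      have hL : get_contiguous_count l index end_ x = 1 + (tw : Int) := by
        rw [gcc_spec l index end_ h0 hlt h2, hcons]
        simp only [← hxdef]
        simp [List.takeWhile]
        omega
      have hlen1 : (pvSeg l end_ index).length = (end_ - index).toNat :=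
        pvSeg_len l end_ index h0 h1 h2
      have hlen2 : xs.length = (end_ - (index + 1)).toNat :=
        pvSeg_len l end_ (index + 1) (by omega) (by omega) h2
      have htwle : tw ≤ xs.length := takeWhile_len_le _ _
      have hdropseg : pvSeg l end_ (index + (1 + (tw : Int))) = xs.dropWhile (fun y => y == x) := by
        have h1' : (index + (1 + (tw : Int))).toNat = index.toNat + (1 + tw) := by omega
        calc pvSeg l end_ (index + (1 + (tw : Int)))
            = (l.take end_.toNat).drop (index.toNat + (1 + tw)) := by unfold pvSeg; rw [h1']
          _ = ((l.take end_.toNat).drop index.toNat).drop (1 + tw) := by rw [List.drop_drop]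
          _ = (pvSeg l end_ index).drop (1 + tw) := rfl
          _ = (x :: xs).drop (tw + 1) := by rw [hcons, Nat.add_comm 1 tw]
          _ = xs.drop tw := List.drop_succ_cons
          _ = xs.dropWhile (fun y => y == x) := by rw [dropWhile_eq_drop, ← htw]
      have hzip : (pvSeg l end_ index).zip (pvRl (pvSeg l end_ index))
          = (x, 1 + (tw : Int)) :: (xs.zip (pvRl xs)) := by
        rw [hcons, pvRl_cons x xs, ← htw]
        rfl
      simp only [pvGncLoop, if_pos hlt, PySem.List.pyGet?_eq_some_getElem l h0 hidx, ← hxdef]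
      by_cases htarget : cv = [] ∨ x ∈ cv
      · -- target (or no target filter): A consumes the whole run at once
        have hcontig :
            (if cv ≠ [] then
              match some x with
              | none => 0
              | some v => if v ∈ cv then get_contiguous_count l index end_ v else 1
            else
              match some x with
              | none => 0
              | some v => get_contiguous_count l index end_ v) = 1 + (tw : Int) := by
          rcases htarget with hcv | hmem
          · rw [if_neg (by simp [hcv])]
            exact hL
          · by_cases hcv : cv = []
            · rw [if_neg (by simp [hcv])]
              exact hL
            · rw [if_pos hcv]
              show (if x ∈ cv then get_contiguous_count l index end_ x else 1) = 1 + (tw : Int)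
              rw [if_pos hmem]
              exact hL
        rw [hcontig]
        have hhead : ¬ (cv ≠ [] ∧ x ∉ cv) := by
          rcases htarget with hcv | hmem
          · exact fun h => h.1 hcv
          · exact fun h => h.2 hmem
        by_cases hlim : 1 + (tw : Int) < limit
        · rw [if_pos hlim]
          rw [ih (index + (1 + (tw : Int))) (total + (1 + (tw : Int))) (by omega) (by omega) h2
              (by rw [pvSeg_len l end_ _ (by omega) (by omega) h2]; omega)]
          rw [hdropseg]
          have hrs := findStop_run_skip limit cv x hhead xs (by rw [← htw]; exact hlim)
          rw [← htw] at hrs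
          rw [hcons, hrs]
          ring
        · rw [if_neg hlim, hzip]
          simp only [pvFindStop, if_neg hhead, if_pos (by omega : limit ≤ 1 + (tw : Int))]
          ring
      · -- non-target value: A steps one element, B advances one position
        rw [not_or] at htarget
        obtain ⟨hcv, hmem⟩ := htarget
        have hcontig :
            (if cv ≠ [] then
              match some x with
              | none => 0
              | some v => if v ∈ cv then get_contiguous_count l index end_ v else 1
            else
              match some x with
              | none => 0
              | some v => get_contiguous_count l index end_ v) = (1 : Int) := by
          rw [if_pos hcv]
          show (if x ∈ cv then get_contiguous_count l index end_ x else 1) = (1 : Int)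
          rw [if_neg hmem]
        rw [hcontig, hzip]
        simp only [pvFindStop, if_pos (And.intro hcv hmem)]
        by_cases hlim : (1 : Int) < limit
        · rw [if_pos hlim, if_neg (by omega : ¬ limit ≤ (1 : Int))]
          rw [ih (index + 1) (total + 1) (by omega) (by omega) h2 (by rw [← hxs]; omega)]
          rw [findStop_shift limit cv _ (0 + 1)]
          ring
        · rw [if_neg hlim, if_pos (by omega : limit ≤ (1 : Int))]
          ring
    · have hseg : pvSeg l end_ index = [] := by
        apply List.eq_nil_of_length_eq_zero
        rw [pvSeg_len l end_ index h0 h1 h2]; omega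
      simp [pvGncLoop, hlt, hseg, pvFindStop]

-- ===== VERDICT (by name: the statement is the Claim_ definition above) =====
theorem get_non_contiguous_count_spec : Claim_equal_get_non_contiguous_count := by
  intro l start end_ limit cv _ hpre
  unfold Spec_get_non_contiguous_count get_non_contiguous_count get_non_contiguous_count_alt
  rcases hpre with ⟨hrange, hcase⟩
  by_cases hlt : start < end_
  · obtain ⟨hs, he⟩ := hrange hlt
    have hslice : PySem.List.slice l (some start) (some end_) = pvSeg l end_ start := by
      rw [PySem.List.slice_toNat l hs (by omega)]
      unfold pvSeg
      rw [List.drop_take]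
    rw [hslice]
    have h := main_loop l end_ limit cv (end_ - start).toNat start 0 hs (le_of_lt hlt) he
      (by rw [pvSeg_len l end_ start hs (le_of_lt hlt) he])
    simpa using h
  · -- loop never runs (A), and the slice is empty (B)
    have hempty : PySem.List.slice l (some start) (some end_) = [] := by
      have := PySem.List.length_slice l start end_
      have hle : PySem.List.clampIdx l.length end_ ≤ PySem.List.clampIdx l.length start :=
        hcase.resolve_left hlt
      apply List.eq_nil_of_length_eq_zero
      omega
    rw [hempty]
    cases hf : (end_ - start).toNat with
    | zero => simp [pvGncLoop, pvFindStop]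
    | succ n => simp [pvGncLoop, pvFindStop, hlt]
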